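-- pv_equiv track=rewrite | github.com/bjarkemoensted/adventofcode | aoc/aoc_2022/solution05.py | determine_remaining_seat_id
-- ===== SOURCE A (Python) =====
-- def get_seat_id(coord: tuple[int, int]) -> int:
--     """Returns the ID of a given seat"""
--     i, j = coord
--     res = i*8 + j
--     return res
--
-- def determine_remaining_seat_id(seat_coords: list[tuple[int, int]]) -> int:
--     all_IDs = {get_seat_id(coord) for coord in seat_coords}
--
--     for i in range(128):
--         for j in range(8):
--             sid = get_seat_id((i, j))
--
--             seat_is_free = sid not in all_IDs
--             neighbours_exist = all(val+sid in all_IDs for val in (1, -1))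
--             correct = seat_is_free and neighbours_exist
--             if correct:
--                 return sid
--             #
--         #
--
--     raise RuntimeError
-- ===== SOURCE B (Python) =====
-- def determine_remaining_seat_id(seat_coords):
--     ids = sorted({i * 8 + j for i, j in seat_coords})
--     for a, b in zip(ids, ids[1:]):
--         if b - a == 2 and 0 <= a + 1 < 128 * 8:
--             return a + 1
--     raise RuntimeError
-- ===== Notes on version B (the rewrite author's own statement) =====
-- stated objective: simpler
-- what changed: Instead of scanning all 1024 grid seats against the occupied set, B sorts the distinct seat IDs once and walks consecutive pairs, returning a+1 at the first gap of exactly 2 whose midpoint lies in the 0..1023 grid range.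
import Mathlib
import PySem

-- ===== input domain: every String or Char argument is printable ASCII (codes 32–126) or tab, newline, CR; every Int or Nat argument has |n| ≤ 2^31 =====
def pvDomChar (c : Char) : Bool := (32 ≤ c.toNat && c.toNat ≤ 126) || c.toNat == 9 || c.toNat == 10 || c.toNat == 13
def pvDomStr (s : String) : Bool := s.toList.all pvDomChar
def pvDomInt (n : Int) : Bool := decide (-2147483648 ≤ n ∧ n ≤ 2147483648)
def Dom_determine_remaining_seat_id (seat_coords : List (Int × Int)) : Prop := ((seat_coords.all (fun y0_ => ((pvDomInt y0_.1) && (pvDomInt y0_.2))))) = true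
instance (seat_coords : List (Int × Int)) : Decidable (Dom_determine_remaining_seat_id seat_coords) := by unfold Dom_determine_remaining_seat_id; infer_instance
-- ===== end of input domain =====

-- B replaces A's scan of all 1024 grid seats by a sort of the distinct seat IDs and a
-- walk over consecutive pairs (first gap of exactly 2 with in-grid midpoint); return
-- values agree on all inputs where A returns (Pre_ excludes the RuntimeError case, where
-- B raises RuntimeError as well).

-- ===== PORT A =====
def get_seat_id (coord : Int × Int) : Int := coord.1 * 8 + coord.2

-- the loop body's condition: seat_is_free and neighbours_exist (vals 1 then -1)
def pvCorrectA (all_IDs : List Int) (sid : Int) : Bool :=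
  (!(decide (sid ∈ all_IDs))) && (decide ((1 + sid) ∈ all_IDs) && decide ((-1 + sid) ∈ all_IDs))

-- the nested for-loops with early return, over the flattened list of sids
def pvFindA (all_IDs : List Int) : List Int → Int
  | [] => 0
  | sid :: rest => if pvCorrectA all_IDs sid then sid else pvFindA all_IDs rest

def determine_remaining_seat_id (seat_coords : List (Int × Int)) : Int :=
  let all_IDs : PySem.Set Int := PySem.Set.ofList (seat_coords.map get_seat_id)
  pvFindA all_IDs
    ((PySem.List.pyRange 0 128 1).flatMap (fun i =>
      (PySem.List.pyRange 0 8 1).map (fun j => get_seat_id (i, j))))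

-- ===== PORT B =====
-- walk consecutive pairs of the sorted distinct IDs
def pvScanB : List Int → Int
  | a :: b :: rest =>
    if (b - a == 2) && (decide (0 ≤ a + 1) && decide (a + 1 < 128 * 8)) then a + 1
    else pvScanB (b :: rest)
  | _ => 0

def determine_remaining_seat_id_alt (seat_coords : List (Int × Int)) : Int :=
  pvScanB (PySem.List.sorted
    (PySem.Set.ofList (seat_coords.map (fun p => p.1 * 8 + p.2))) (fun x => x) false)

-- ===== PRECONDITION & SPEC =====
-- Pre_ excludes exactly the inputs with no free seat ID in 0..1023 whose two neighbour
-- IDs are both occupied: there A raises RuntimeError (B raises RuntimeError too).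
def Pre_determine_remaining_seat_id (seat_coords : List (Int × Int)) : Prop :=
  ∃ p ∈ seat_coords, 0 ≤ p.1 * 8 + p.2 + 1 ∧ p.1 * 8 + p.2 + 1 < 1024 ∧
    (p.1 * 8 + p.2 + 1) ∉ seat_coords.map (fun q => q.1 * 8 + q.2) ∧
    (p.1 * 8 + p.2 + 2) ∈ seat_coords.map (fun q => q.1 * 8 + q.2)
instance (seat_coords : List (Int × Int)) : Decidable (Pre_determine_remaining_seat_id seat_coords) := by
  unfold Pre_determine_remaining_seat_id; infer_instance

def pvWitness_determine_remaining_seat_id : (List (Int × Int)) := [(0, 3), (0, 5)]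

def Spec_determine_remaining_seat_id (seat_coords : List (Int × Int)) (out : Int) : Prop := out = determine_remaining_seat_id_alt seat_coords
instance (seat_coords : List (Int × Int)) (out : Int) : Decidable (Spec_determine_remaining_seat_id seat_coords out) := by unfold Spec_determine_remaining_seat_id; infer_instance

-- ===== CLAIM (what is proved, stated in full; the proofs are below) =====
def Claim_equal_determine_remaining_seat_id : Prop := ∀ (seat_coords : List (Int × Int)), Dom_determine_remaining_seat_id seat_coords → Pre_determine_remaining_seat_id seat_coords → Spec_determine_remaining_seat_id seat_coords (determine_remaining_seat_id seat_coords)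

-- ===== LEMMAS AND PROOFS =====

-- A's flattened sid list is just range(1024)
set_option maxRecDepth 10000 in
lemma pvSids_eq :
    ((PySem.List.pyRange 0 128 1).flatMap (fun i =>
      (PySem.List.pyRange 0 8 1).map (fun j => get_seat_id (i, j))))
    = PySem.List.pyRange 0 1024 1 := by decide

-- A's early-return search on a strictly increasing list with a satisfier: the result is
-- a least satisfying member.
lemma pvFindA_props (S : List Int) :
    ∀ (l : List Int), l.Pairwise (· < ·) → (∃ x ∈ l, pvCorrectA S x = true) →
      pvFindA S l ∈ l ∧ pvCorrectA S (pvFindA S l) = true ∧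
        ∀ x ∈ l, pvCorrectA S x = true → pvFindA S l ≤ x := by
  intro l
  induction l with
  | nil => intro _ h; rcases h with ⟨x, hx, _⟩; cases hx
  | cons h t ih =>
    intro hp hex
    by_cases hc : pvCorrectA S h = true
    · refine ⟨?_, ?_, ?_⟩
      · simp [pvFindA, hc]
      · simp [pvFindA, hc]
      · intro x hx _
        simp [pvFindA, hc]
        rcases List.mem_cons.mp hx with rfl | hxt
        · exact le_refl x
        · exact le_of_lt ((List.pairwise_cons.mp hp).1 x hxt)
    · have hex' : ∃ x ∈ t, pvCorrectA S x = true := by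
        rcases hex with ⟨x, hx, hpx⟩
        rcases List.mem_cons.mp hx with rfl | hxt
        · exact absurd hpx hc
        · exact ⟨x, hxt, hpx⟩
      obtain ⟨hm, hpm, hmin⟩ := ih (List.pairwise_cons.mp hp).2 hex'
      refine ⟨?_, ?_, ?_⟩
      · simp [pvFindA, hc]; exact Or.inr hm
      · simpa [pvFindA, hc] using hpm
      · intro x hx hpx
        rcases List.mem_cons.mp hx with rfl | hxt
        · exact absurd hpx hc
        · simpa [pvFindA, hc] using hmin x hxt hpx

-- B's pair walk on a strictly increasing list returns the least m in [0,1024) that is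
-- absent while m-1 and m+1 are present.
lemma pvScanB_eq (L : List Int) (hL : L.Pairwise (· < ·)) (m : Int)
    (h1 : (m - 1) ∈ L) (h2 : (m + 1) ∈ L) (h3 : m ∉ L)
    (h0 : 0 ≤ m) (h1024 : m < 1024)
    (hmin : ∀ y : Int, (y - 1) ∈ L → (y + 1) ∈ L → y ∉ L → 0 ≤ y → y < 1024 → m ≤ y) :
    pvScanB L = m := by
  induction L with
  | nil => cases h1
  | cons a t ih =>
    cases t with
    | nil =>
      rcases List.mem_cons.mp h1 with e1 | e1
      · rcases List.mem_cons.mp h2 with e2 | e2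
        · omega
        · cases e2
      · cases e1
    | cons b rest =>
      have hab : a < b := (List.pairwise_cons.mp hL).1 b (by simp)
      have hrest : ∀ x ∈ rest, b < x := fun x hx =>
        (List.pairwise_cons.mp (List.pairwise_cons.mp hL).2).1 x hx
      have harest : ∀ x ∈ rest, a < x := fun x hx => lt_trans hab (hrest x hx)
      by_cases hc : ((b - a == 2) && (decide (0 ≤ a + 1) && decide (a + 1 < 128 * 8))) = true
      · -- head pair qualifies: result is a+1; show m = a+1
        have hc' := hc
        simp only [Bool.and_eq_true, beq_iff_eq, decide_eq_true_eq] at hc'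
        obtain ⟨hb2, hr0, hr1⟩ := hc'
        have hgoal : pvScanB (a :: b :: rest) = a + 1 := by
          unfold pvScanB; rw [if_pos hc]
        rw [hgoal]
        have hnm : (a + 1) ∉ a :: b :: rest := by
          intro hmem
          rcases List.mem_cons.mp hmem with e | e
          · omega
          rcases List.mem_cons.mp e with e | e
          · omega
          · have := hrest _ e; omega
        have hle : m ≤ a + 1 := by
          refine hmin (a + 1) ?_ ?_ hnm (by omega) (by omega)
          · have h : a + 1 - 1 = a := by ring
            rw [h]; exact List.mem_cons_self
          · have h : a + 1 + 1 = b := by omega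
            rw [h]; exact List.mem_cons_of_mem _ List.mem_cons_self
        have hge : a + 1 ≤ m := by
          rcases List.mem_cons.mp h1 with e | e
          · omega
          rcases List.mem_cons.mp e with e | e
          · omega
          · have := hrest _ e; omega
        omega
      · -- head pair does not qualify: m's witnesses live in the tail
        have hbm : b ≠ m := fun h => h3 (by simp [h])
        have hma : m - 1 ≠ a := by
          intro heq
          rcases List.mem_cons.mp h2 with e | e
          · omega
          rcases List.mem_cons.mp e with e | e
          · refine absurd ?_ hc
            simp only [Bool.and_eq_true, beq_iff_eq, decide_eq_true_eq]
            omega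
          · have := hrest _ e; omega
        have hpa : m + 1 ≠ a := by
          intro heq
          rcases List.mem_cons.mp h1 with e | e
          · omega
          rcases List.mem_cons.mp e with e | e
          · omega
          · have := hrest _ e; omega
        have h1' : m - 1 ∈ b :: rest := by
          rcases List.mem_cons.mp h1 with e | e
          · exact absurd e hma
          · exact e
        have h2' : m + 1 ∈ b :: rest := by
          rcases List.mem_cons.mp h2 with e | e
          · exact absurd e hpa
          · exact e
        have h3' : m ∉ b :: rest := fun h => h3 (List.mem_cons_of_mem _ h)
        have hmin' : ∀ y : Int, (y - 1) ∈ b :: rest → (y + 1) ∈ b :: rest →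
            y ∉ b :: rest → 0 ≤ y → y < 1024 → m ≤ y := by
          intro y hy1 hy2 hy3 hy0 hy4
          have hya : y ≠ a := by
            intro heq
            rcases List.mem_cons.mp hy1 with e | e
            · omega
            · have := hrest _ e; omega
          refine hmin y (List.mem_cons_of_mem _ hy1) (List.mem_cons_of_mem _ hy2) ?_ hy0 hy4
          intro hmem
          rcases List.mem_cons.mp hmem with e | e
          · exact hya e
          · exact hy3 e
        have hgoal : pvScanB (a :: b :: rest) = pvScanB (b :: rest) := by
          conv_lhs => rw [pvScanB]
          rw [if_neg hc]
        rw [hgoal]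
        exact ih (List.pairwise_cons.mp hL).2 h1' h2' h3' hmin'

-- ===== VERDICT (by name: the statement is the Claim_ definition above) =====
theorem determine_remaining_seat_id_spec : Claim_equal_determine_remaining_seat_id := by
  intro sc hdom hpre
  unfold Spec_determine_remaining_seat_id determine_remaining_seat_id determine_remaining_seat_id_alt
  rw [pvSids_eq]
  have hmemS : ∀ x : Int, x ∈ PySem.Set.ofList (sc.map get_seat_id) ↔
      x ∈ sc.map (fun p => p.1 * 8 + p.2) := by
    intro x; rw [PySem.Set.mem_ofList]; simp [get_seat_id]
  have hcorr : ∀ x : Int, pvCorrectA (PySem.Set.ofList (sc.map get_seat_id)) x = true ↔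
      (x ∉ sc.map (fun p => p.1 * 8 + p.2) ∧ (x - 1) ∈ sc.map (fun p => p.1 * 8 + p.2) ∧
        (x + 1) ∈ sc.map (fun p => p.1 * 8 + p.2)) := by
    intro x
    have e1 : (1 : Int) + x = x + 1 := by ring
    have e2 : (-1 : Int) + x = x - 1 := by ring
    simp only [pvCorrectA, e1, e2, Bool.and_eq_true, Bool.not_eq_true',
      decide_eq_false_iff_not, decide_eq_true_eq, hmemS]
    tauto
  have hex : ∃ x ∈ PySem.List.pyRange 0 1024 1,
      pvCorrectA (PySem.Set.ofList (sc.map get_seat_id)) x = true := by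
    obtain ⟨p, hp, h0, h1, hfree, hup⟩ := hpre
    refine ⟨p.1 * 8 + p.2 + 1, (PySem.List.mem_pyRange_one).mpr ⟨h0, h1⟩, (hcorr _).mpr ⟨hfree, ?_, ?_⟩⟩
    · have h : p.1 * 8 + p.2 + 1 - 1 = p.1 * 8 + p.2 := by ring
      rw [h]; exact List.mem_map.mpr ⟨p, hp, rfl⟩
    · have h : p.1 * 8 + p.2 + 1 + 1 = p.1 * 8 + p.2 + 2 := by ring
      rw [h]; exact hup
  obtain ⟨hmemM, hpM, hminM⟩ := pvFindA_props (PySem.Set.ofList (sc.map get_seat_id))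
    (PySem.List.pyRange 0 1024 1) (PySem.List.pairwise_lt_pyRange_one 0 1024) hex
  have hrangeM := (PySem.List.mem_pyRange_one).mp hmemM
  obtain ⟨hnm, hm1, hm2⟩ := (hcorr _).mp hpM
  have hLp : (PySem.List.sorted
      (PySem.Set.ofList (sc.map (fun p => p.1 * 8 + p.2))) (fun x => x) false).Pairwise (· < ·) :=
    PySem.List.sorted_ofList_pairwise_lt _
  have hmemL : ∀ x : Int, x ∈ PySem.List.sorted
      (PySem.Set.ofList (sc.map (fun p => p.1 * 8 + p.2))) (fun x => x) false ↔
      x ∈ sc.map (fun p => p.1 * 8 + p.2) := by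
    intro x; rw [PySem.List.mem_sorted, PySem.Set.mem_ofList]
  refine (pvScanB_eq _ hLp _ ((hmemL _).mpr hm1) ((hmemL _).mpr hm2)
    (fun h => hnm ((hmemL _).mp h)) hrangeM.1 hrangeM.2 ?_).symm
  intro y hy1 hy2 hy3 hy0 hy4
  exact hminM y ((PySem.List.mem_pyRange_one).mpr ⟨hy0, hy4⟩)
    ((hcorr y).mpr ⟨fun h => hy3 ((hmemL y).mpr h), (hmemL _).mp hy1, (hmemL _).mp hy2⟩)
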